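-- pv_equiv track=rewrite | github.com/dmackinnon1/portia | build/portia.py | pointerList
-- ===== SOURCE A (Python) =====
-- def caskets(n):
--     return [i+1 for i in range(n)]
--
-- def hasPointer(i, pointers) :
--     for j in pointers:
--         if i == j : return True
--         if i == -1*j : return True
--     a = []
--     for j in pointers:
--         a.append(abs(j))
--     if len(set(a)) >1 : return True
--     return False;
--
-- def pointerList(pointers) :
--     n = len(pointers)
--     c = caskets(n)
--     results = []
--     for i in c:
--         if hasPointer(i, pointers):
--             results.append(i)
--     return results
-- ===== SOURCE B (Python) =====
-- def pointerList(pointers):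
--     n = len(pointers)
--     absset = {abs(j) for j in pointers}
--     if len(absset) > 1:
--         return list(range(1, n + 1))
--     if absset:
--         v = absset.pop()
--         return [v] if 1 <= v <= n else []
--     return []
-- ===== Notes on version B (the rewrite author's own statement) =====
-- stated objective: faster
-- what changed: Replaces the per-casket scan (which rebuilds the abs-value set inside hasPointer for every casket) with a single case split on the set of distinct absolute values: more than one distinct value yields all caskets 1..n, a single value v yields [v] when it lies in range and nothing otherwise.
import Mathlib
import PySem

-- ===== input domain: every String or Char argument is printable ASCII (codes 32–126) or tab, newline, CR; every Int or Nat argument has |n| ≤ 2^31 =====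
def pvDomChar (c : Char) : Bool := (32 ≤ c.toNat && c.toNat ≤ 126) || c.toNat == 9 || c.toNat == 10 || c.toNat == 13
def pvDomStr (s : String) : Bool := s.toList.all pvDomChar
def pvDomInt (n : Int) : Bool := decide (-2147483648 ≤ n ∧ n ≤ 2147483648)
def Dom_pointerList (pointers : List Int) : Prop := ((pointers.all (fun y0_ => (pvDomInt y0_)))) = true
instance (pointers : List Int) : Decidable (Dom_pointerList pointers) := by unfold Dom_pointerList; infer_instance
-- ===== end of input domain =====

-- B replaces A's per-casket rescans with one case split on the distinct absolute values of the pointers.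


-- ===== PORT A =====
def caskets (n : Int) : List Int :=
  (PySem.List.pyRange 0 n 1).map (fun i => i + 1)

def hasPointer (i : Int) (pointers : List Int) : Bool :=
  if pointers.any (fun j => i == j || i == (-1) * j) then true
  else
    let a : List Int := pointers.foldl (fun acc j => acc ++ [|j|]) []
    decide (1 < (PySem.Set.ofList a).length)

def pointerList (pointers : List Int) : List Int :=
  let n : Int := pointers.length
  let c := caskets n
  c.foldl (fun results i => if hasPointer i pointers then results ++ [i] else results) []

-- ===== PORT B =====
def pointerList_alt (pointers : List Int) : List Int :=
  let n : Int := pointers.length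
  let absset : PySem.Set Int := PySem.Set.ofList (pointers.map (fun j => |j|))
  if 1 < absset.length then PySem.List.pyRange 1 (n + 1) 1
  else
    match absset with
    | [] => []
    | v :: _ => if 1 ≤ v ∧ v ≤ n then [v] else []


-- ===== PRECONDITION & SPEC =====
def Spec_pointerList (pointers : List Int) (out : List Int) : Prop := out = pointerList_alt pointers
instance (pointers : List Int) (out : List Int) : Decidable (Spec_pointerList pointers out) := by unfold Spec_pointerList; infer_instance

-- ===== CLAIM (what is proved, stated in full; the proofs are below) =====
def Claim_equal_pointerList : Prop := ∀ (pointers : List Int), Dom_pointerList pointers → Spec_pointerList pointers (pointerList pointers)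

-- ===== LEMMAS AND PROOFS =====
theorem caskets_eq_pyRange (n : Int) : caskets n = PySem.List.pyRange 1 (n + 1) 1 := by
  rw [caskets, PySem.List.pyRange_one, PySem.List.pyRange_one, List.map_map]
  have h : (n + 1 - 1).toNat = (n - 0).toNat := by omega
  rw [h]
  apply List.map_congr_left
  intro k _
  simp; ring

theorem hasPointer_eq (i : Int) (ps : List Int) :
    hasPointer i ps = (ps.any (fun j => i == j || i == (-1) * j)
      || decide (1 < (PySem.Set.ofList (ps.map (fun j => |j|))).length)) := by
  rw [hasPointer, PySem.List.foldl_append_singleton_eq_map, List.nil_append]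
  cases h : ps.any (fun j => i == j || i == (-1) * j) <;> simp

theorem pointerList_eq_filter (ps : List Int) :
    pointerList ps = (caskets (ps.length : Int)).filter (fun i => hasPointer i ps) := by
  rw [pointerList, PySem.List.foldl_append_if_eq_filter, List.nil_append]

theorem filter_beq_nodup {l : List Int} (hl : l.Nodup) (v : Int) :
    l.filter (fun i => i == v) = if v ∈ l then [v] else [] := by
  induction l with
  | nil => simp
  | cons a t ih =>
    rcases List.nodup_cons.mp hl with ⟨ha, ht⟩
    by_cases hav : a = v
    · subst hav
      have : t.filter (fun i => i == a) = [] := by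
        rw [ih ht]; simp [ha]
      simp [this]
    · rw [List.filter_cons]
      simp only [beq_iff_eq, hav, if_false, List.mem_cons]
      rw [ih ht]
      by_cases hv : v ∈ t <;> simp [hv, Ne.symm hav]

theorem absMatch {i j v : Int} (hi : 1 ≤ i) (hjv : |j| = v) : (i = j ∨ i = -1 * j) ↔ i = v := by
  rcases abs_cases j with ⟨h1, h2⟩ | ⟨h1, h2⟩ <;> omega

theorem pointerList_eq_alt (pointers : List Int) : pointerList pointers = pointerList_alt pointers := by
  set L : List Int := pointers.map (fun j => |j|) with hL
  rw [pointerList_eq_filter]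
  simp only [pointerList_alt]
  by_cases hlen : 1 < (PySem.Set.ofList L).length
  · rw [if_pos hlen]
    rw [List.filter_eq_self.mpr, caskets_eq_pyRange]
    intro i _
    rw [hasPointer_eq]
    simp only [← hL, hlen, decide_true, Bool.or_true]
  · rw [if_neg hlen]
    match hS : (PySem.Set.ofList L : List Int) with
    | [] =>
      have hLnil : L = [] := by
        by_contra hne
        rcases List.exists_mem_of_ne_nil _ hne with ⟨x, hx⟩
        have : x ∈ (PySem.Set.ofList L : List Int) := (PySem.Set.mem_ofList _ _).mpr hx
        simp [hS] at this
      have hps : pointers = [] := by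
        cases pointers with
        | nil => rfl
        | cons a t => simp [hL] at hLnil
      subst hps
      decide
    | v :: rest =>
      have hrest : rest = [] := by
        cases rest with
        | nil => rfl
        | cons b s => rw [hS] at hlen; simp at hlen
      subst hrest
      have habs : ∀ j ∈ pointers, |j| = v := by
        intro j hj
        have : |j| ∈ (PySem.Set.ofList L : List Int) :=
          (PySem.Set.mem_ofList _ _).mpr (List.mem_map_of_mem hj)
        rw [hS] at this; simpa using this
      have hvmem : v ∈ L := by
        have : v ∈ (PySem.Set.ofList L : List Int) := by rw [hS]; simp
        exact (PySem.Set.mem_ofList _ _).mp this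
      rcases List.mem_map.mp hvmem with ⟨j0, hj0, hj0v⟩
      have hfilt : (caskets (pointers.length : Int)).filter (fun i => hasPointer i pointers)
          = (caskets (pointers.length : Int)).filter (fun i => i == v) := by
        apply List.filter_congr
        intro i hi
        have hi1 : 1 ≤ i := by
          rw [caskets_eq_pyRange] at hi
          exact (PySem.List.mem_pyRange_one.mp hi).1
        rw [hasPointer_eq]
        have h2 : decide (1 < (PySem.Set.ofList L).length) = false := by
          simp [hlen]
        rw [← hL, h2, Bool.or_false]
        by_cases hiv : i = v
        · have hany : (pointers.any fun j => i == j || i == (-1) * j) = true := by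
            rw [List.any_eq_true]
            refine ⟨j0, hj0, ?_⟩
            simp only [beq_iff_eq, Bool.or_eq_true]
            exact (absMatch hi1 hj0v).mpr hiv
          rw [hany]; simp [hiv]
        · have hne : (i == v) = false := by simp [hiv]
          rw [hne, List.any_eq_false]
          intro j hj
          simp only [beq_iff_eq, Bool.or_eq_true, not_or]
          have := (absMatch hi1 (habs j hj))
          constructor <;> intro h <;> exact hiv (this.mp (by omega))
      rw [hfilt, caskets_eq_pyRange,
        filter_beq_nodup (PySem.List.nodup_pyRange_one 1 ((pointers.length : Int) + 1)) v]
      by_cases hv : 1 ≤ v ∧ v ≤ (pointers.length : Int)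
      · have hm : v ∈ PySem.List.pyRange 1 ((pointers.length : Int) + 1) 1 :=
          PySem.List.mem_pyRange_one.mpr ⟨hv.1, by omega⟩
        simp [hm, hv]
      · have hm : v ∉ PySem.List.pyRange 1 ((pointers.length : Int) + 1) 1 := by
          intro hmem
          rcases PySem.List.mem_pyRange_one.mp hmem with ⟨h1, h2⟩
          exact hv ⟨h1, by omega⟩
        simp [hm, hv]

-- ===== VERDICT (by name: the statement is the Claim_ definition above) =====
theorem pointerList_spec : Claim_equal_pointerList := by
  intro pointers _
  unfold Spec_pointerList
  exact pointerList_eq_alt pointers
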